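-- pv_equiv track=rewrite | github.com/vababa/xselparse | xsel_parse/xl_parse.py | make_offset_list
-- ===== SOURCE A (Python) =====
-- def make_offset_list(quest_num, tours):
--     '''
--     Создает список кортежей (first_tour_cell, last_tour_cell) с номерами
--     столбцов первого и последнего вопроса каждого тура
--     :param quest_num: число вопросов в туре
--     :param tours: количество туров
--     :return: Список кортежей типа (first_tour_cell, last_tour_cell)
--     '''
--     offset = 0
--     begin_col = 2
--     result = []
--     for tour in range(1, tours + 1):
--         if tour == 2:
--             offset = quest_num + 1
--         elif tour > 2:
--             offset = quest_num + 2
--         begin_col += offset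
--         end_col = begin_col + quest_num
--         result.append((begin_col, end_col))
--     return result
-- ===== SOURCE B (Python) =====
-- def make_offset_list(quest_num, tours):
--     '''Closed-form per-tour computation: each tuple derived directly from the tour index.'''
--     result = []
--     for t in range(1, tours + 1):
--         base = 2 if t == 1 else 2 * t - 1
--         begin = (t - 1) * quest_num + base
--         result.append((begin, begin + quest_num))
--     return result
-- ===== Notes on version B (the rewrite author's own statement) =====
-- stated objective: simpler
-- what changed: Replaces the mutable offset/begin_col accumulators carried across loop iterations with a direct closed-form computation of each tuple from its tour index t (base = 2 if t==1 else 2*t-1, begin = (t-1)*quest_num + base).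
import Mathlib
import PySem

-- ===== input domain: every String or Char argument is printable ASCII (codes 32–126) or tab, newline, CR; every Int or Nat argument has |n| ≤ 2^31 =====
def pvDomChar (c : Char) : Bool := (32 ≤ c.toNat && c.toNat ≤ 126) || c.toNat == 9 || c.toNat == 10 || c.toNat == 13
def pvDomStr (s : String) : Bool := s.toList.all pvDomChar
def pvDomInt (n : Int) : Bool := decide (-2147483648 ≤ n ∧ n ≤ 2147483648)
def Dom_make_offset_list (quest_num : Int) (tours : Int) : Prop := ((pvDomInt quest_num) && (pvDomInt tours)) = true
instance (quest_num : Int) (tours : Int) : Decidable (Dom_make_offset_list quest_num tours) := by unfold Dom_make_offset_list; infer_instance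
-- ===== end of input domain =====

-- B computes each tuple in closed form from the tour index, dropping A's running accumulators (objective: simpler).

-- ===== PORT A =====
-- loop body of A: state = (offset, begin_col, result)
def mol_stepA (quest_num : Int) (st : Int × Int × List (Int × Int)) (tour : Int) : Int × Int × List (Int × Int) :=
  let offset := if tour = 2 then quest_num + 1 else if tour > 2 then quest_num + 2 else st.1
  let begin_col := st.2.1 + offset
  let end_col := begin_col + quest_num
  (offset, begin_col, st.2.2 ++ [(begin_col, end_col)])

def make_offset_list (quest_num : Int) (tours : Int) : List (Int × Int) :=
  ((PySem.List.pyRange 1 (tours + 1) 1).foldl (mol_stepA quest_num) (0, 2, [])).2.2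

-- ===== PORT B =====
-- closed-form tuple for tour t
def mol_tuple (quest_num : Int) (t : Int) : Int × Int :=
  let base := if t = 1 then 2 else 2 * t - 1
  let begin := (t - 1) * quest_num + base
  (begin, begin + quest_num)

def make_offset_list_alt (quest_num : Int) (tours : Int) : List (Int × Int) :=
  (PySem.List.pyRange 1 (tours + 1) 1).map (mol_tuple quest_num)

-- ===== PRECONDITION & SPEC =====
def Spec_make_offset_list (quest_num : Int) (tours : Int) (out : List (Int × Int)) : Prop := out = make_offset_list_alt quest_num tours
instance (quest_num : Int) (tours : Int) (out : List (Int × Int)) : Decidable (Spec_make_offset_list quest_num tours out) := by unfold Spec_make_offset_list; infer_instance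

-- ===== CLAIM (what is proved, stated in full; the proofs are below) =====
def Claim_equal_make_offset_list : Prop := ∀ (quest_num : Int) (tours : Int), Dom_make_offset_list quest_num tours → Spec_make_offset_list quest_num tours (make_offset_list quest_num tours)

-- ===== LEMMAS AND PROOFS =====

-- closed form of A's carried state after processing tours 1..n
def mol_off (quest_num : Int) (n : ℕ) : Int :=
  if n = 1 then 0 else if n = 2 then quest_num + 1 else quest_num + 2
def mol_beg (quest_num : Int) (n : ℕ) : Int :=
  ((n : Int) - 1) * quest_num + (if n = 1 then 2 else 2 * (n : Int) - 1)

theorem mol_invariant (quest_num : Int) (n : ℕ) (hn : 1 ≤ n) :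
    (PySem.List.pyRange 1 ((n : Int) + 1) 1).foldl (mol_stepA quest_num) (0, 2, []) =
      (mol_off quest_num n, mol_beg quest_num n,
        (PySem.List.pyRange 1 ((n : Int) + 1) 1).map (mol_tuple quest_num)) := by
  induction n with
  | zero => omega
  | succ m ih =>
    by_cases hm : m = 0
    · subst hm
      have h12 : PySem.List.pyRange 1 2 1 = [1] := by decide
      norm_num [h12, mol_stepA, mol_off, mol_beg, mol_tuple]
    · have h1m : 1 ≤ m := Nat.one_le_iff_ne_zero.mpr hm
      have hsplit : PySem.List.pyRange 1 ((m : Int) + 1 + 1) 1 =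
          PySem.List.pyRange 1 ((m : Int) + 1) 1 ++ [(m : Int) + 1] := by
        exact PySem.List.pyRange_one_succ_right (by omega)
      rw [show ((m + 1 : ℕ) : Int) = (m : Int) + 1 by push_cast; ring] at *
      rw [hsplit, List.foldl_append, ih h1m, List.map_append]
      simp only [List.foldl_cons, List.foldl_nil, List.map_cons, List.map_nil]
      have hne1 : (m : Int) + 1 ≠ 1 := by omega
      have hn1 : m + 1 ≠ 1 := by omega
      rcases Nat.lt_or_ge m 2 with hm2 | hm2
      · -- m = 1, tour = 2
        have hm1 : m = 1 := by omega
        subst hm1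
        simp only [mol_stepA, mol_off, mol_beg, mol_tuple, Prod.mk.injEq,
          List.append_right_inj, List.cons.injEq, and_true]
        norm_num
        omega
      · -- m ≥ 2, tour = m+1 ≥ 3
        have hne2 : ¬ ((m : Int) + 1 = 2) := by omega
        have hgt2 : (m : Int) + 1 > 2 := by omega
        have hmne1 : m ≠ 1 := by omega
        have hn2 : m + 1 ≠ 2 := by omega
        simp only [mol_stepA, mol_off, mol_beg, mol_tuple, if_neg hne1, if_neg hne2,
          if_pos hgt2, if_neg hmne1, if_neg hn1, if_neg hn2, Prod.mk.injEq]
        simp only [List.append_right_inj, List.cons.injEq, and_true]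
        exact ⟨trivial, by push_cast; ring, by rw [Prod.mk.injEq]; constructor <;> (push_cast; ring)⟩

-- ===== VERDICT (by name: the statement is the Claim_ definition above) =====
theorem make_offset_list_spec : Claim_equal_make_offset_list := by
  intro quest_num tours _
  unfold Spec_make_offset_list make_offset_list make_offset_list_alt
  rcases Int.lt_or_le tours 1 with h | h
  · rw [PySem.List.pyRange_one_eq_nil (by omega)]
    simp
  · obtain ⟨n, rfl⟩ := Int.eq_ofNat_of_zero_le (by omega : (0 : Int) ≤ tours)
    have hn : 1 ≤ n := by exact_mod_cast h
    rw [mol_invariant quest_num n hn]
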